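-- pv_equiv track=rewrite | github.com/akash-sgta/Data-Structures-and-Algorithms-Specialization | 1_Algorithmic_Toolbox/Week_2/4_Least_Common_Multiple/main.py | least_common_multiple_naive
-- ===== SOURCE A (Python) =====
-- def least_common_multiple_naive(num_1, num_2):
--     if(num_1 > num_2):
--         great = num_1
--     else:
--         great = num_2
--
--     while True:
--         if((great % num_1 == 0) and (great % num_2 == 0)):
--             lcm = great
--             break
--         great += 1
--
--     return lcm
-- ===== SOURCE B (Python) =====
-- def least_common_multiple_naive(num_1, num_2):
--     # Euclidean gcd, then lcm = |num_1 * num_2| / gcd.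
--     a, b = abs(num_1), abs(num_2)
--     while b:
--         a, b = b, a % b
--     return abs(num_1 * num_2) // a
-- ===== Notes on version B (the rewrite author's own statement) =====
-- stated objective: faster
-- what changed: Replaced A's linear upward scan from max(num_1,num_2) testing every integer for common divisibility by a Euclidean gcd and the closed form lcm = |num_1*num_2|/gcd.
-- intended difference: When both arguments are negative, A's scan starting below zero returns 0 (or the negative maximum when it happens to divide both), which is not a least common multiple; B returns the positive lcm of the magnitudes, the intended value. — e.g. on least_common_multiple_naive(-2, -3): A returns 0, B returns 6
import Mathlib
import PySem

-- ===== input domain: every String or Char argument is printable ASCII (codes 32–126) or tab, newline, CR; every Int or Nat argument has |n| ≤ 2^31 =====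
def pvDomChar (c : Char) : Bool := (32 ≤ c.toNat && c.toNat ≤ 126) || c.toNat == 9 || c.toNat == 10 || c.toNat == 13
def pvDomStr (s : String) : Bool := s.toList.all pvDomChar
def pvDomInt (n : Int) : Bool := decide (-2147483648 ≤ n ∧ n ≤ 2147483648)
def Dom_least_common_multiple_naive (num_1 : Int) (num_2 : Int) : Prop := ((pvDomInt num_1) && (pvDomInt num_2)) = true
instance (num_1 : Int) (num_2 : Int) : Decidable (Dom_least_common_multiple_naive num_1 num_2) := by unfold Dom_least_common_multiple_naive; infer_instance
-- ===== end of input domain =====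

-- B replaces A's linear upward scan for a common multiple by a Euclidean gcd
-- and the closed form lcm = |num_1*num_2|/gcd (objective: faster); on two
-- negative arguments A's value (0 or a negative number) is stated as an
-- intended difference (D_ below).

-- ===== PORT A =====
-- A's `while True: … great += 1` loop; the fuel argument only makes the loop
-- total in Lean (it is proved sufficient under Pre_, where Python A returns).
def pvLoopA (num_1 : Int) (num_2 : Int) : Nat → Int → Int
  | 0, _ => 0
  | fuel + 1, great =>
    if PySem.Int.mod great num_1 = 0 ∧ PySem.Int.mod great num_2 = 0 then great
    else pvLoopA num_1 num_2 fuel (great + 1)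

def least_common_multiple_naive (num_1 : Int) (num_2 : Int) : Int :=
  let great : Int := if num_1 > num_2 then num_1 else num_2
  pvLoopA num_1 num_2 (num_1.natAbs * num_2.natAbs + 1) great

-- ===== PORT B =====
-- B's `while b: a, b = b, a % b` Euclidean loop (on the absolute values).
def pvEuclid : Nat → Nat → Nat
  | a, 0 => a
  | a, b + 1 => pvEuclid (b + 1) (a % (b + 1))
termination_by _ b => b
decreasing_by exact Nat.mod_lt _ (Nat.succ_pos b)

def least_common_multiple_naive_alt (num_1 : Int) (num_2 : Int) : Int :=
  let g : Nat := pvEuclid num_1.natAbs num_2.natAbs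
  PySem.Int.floordiv ((num_1 * num_2).natAbs : Int) (g : Int)

-- ===== PRECONDITION & SPEC =====
-- Pre_ excludes exactly the inputs where Python A raises ZeroDivisionError
-- (an argument equal to 0).
def Pre_least_common_multiple_naive (num_1 : Int) (num_2 : Int) : Prop :=
  num_1 ≠ 0 ∧ num_2 ≠ 0
instance (num_1 : Int) (num_2 : Int) : Decidable (Pre_least_common_multiple_naive num_1 num_2) := by
  unfold Pre_least_common_multiple_naive; infer_instance

def pvWitness_least_common_multiple_naive : Int × Int := (6, 4)

-- When both arguments are negative, A's scan starting below zero returns 0 (or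
-- the negative maximum when it happens to divide both), which is not a least
-- common multiple; B returns the positive lcm of the magnitudes, the intended value.
def D_least_common_multiple_naive (num_1 : Int) (num_2 : Int) : Prop :=
  num_1 < 0 ∧ num_2 < 0
instance (num_1 : Int) (num_2 : Int) : Decidable (D_least_common_multiple_naive num_1 num_2) := by
  unfold D_least_common_multiple_naive; infer_instance

def Spec_least_common_multiple_naive (num_1 : Int) (num_2 : Int) (out : Int) : Prop := ¬ D_least_common_multiple_naive num_1 num_2 → out = least_common_multiple_naive_alt num_1 num_2
instance (num_1 : Int) (num_2 : Int) (out : Int) : Decidable (Spec_least_common_multiple_naive num_1 num_2 out) := by unfold Spec_least_common_multiple_naive; infer_instance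

def pvDiffWitness_least_common_multiple_naive : Int × Int := (-2, -3)
def pvDiffWitnessOut_least_common_multiple_naive : Int × Int := (0, 6)

-- ===== CLAIM (what is proved, stated in full; the proofs are below) =====
def Claim_unchanged_least_common_multiple_naive : Prop := ∀ (num_1 : Int) (num_2 : Int), Dom_least_common_multiple_naive num_1 num_2 → Pre_least_common_multiple_naive num_1 num_2 → Spec_least_common_multiple_naive num_1 num_2 (least_common_multiple_naive num_1 num_2)
def Claim_changed_least_common_multiple_naive : Prop := Dom_least_common_multiple_naive (pvDiffWitness_least_common_multiple_naive.1) (pvDiffWitness_least_common_multiple_naive.2) ∧ Pre_least_common_multiple_naive (pvDiffWitness_least_common_multiple_naive.1) (pvDiffWitness_least_common_multiple_naive.2) ∧ D_least_common_multiple_naive (pvDiffWitness_least_common_multiple_naive.1) (pvDiffWitness_least_common_multiple_naive.2) ∧ least_common_multiple_naive (pvDiffWitness_least_common_multiple_naive.1) (pvDiffWitness_least_common_multiple_naive.2) = pvDiffWitnessOut_least_common_multiple_naive.1 ∧ least_common_multiple_naive_alt (pvDiffWitness_least_common_multiple_naive.1) (pvDiffWitness_least_common_multiple_naive.2) = pvDiffWitnessOut_least_common_multiple_naive.2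 ∧ pvDiffWitnessOut_least_common_multiple_naive.1 ≠ pvDiffWitnessOut_least_common_multiple_naive.2
def Claim_exact_least_common_multiple_naive : Prop := ∀ (num_1 : Int) (num_2 : Int), Dom_least_common_multiple_naive num_1 num_2 → Pre_least_common_multiple_naive num_1 num_2 → D_least_common_multiple_naive num_1 num_2 → least_common_multiple_naive num_1 num_2 ≠ least_common_multiple_naive_alt num_1 num_2

-- ===== LEMMAS AND PROOFS =====

-- B's hand-written Euclidean loop computes Nat.gcd.
theorem pvEuclid_eq_gcd (a b : Nat) : pvEuclid a b = Nat.gcd a b := by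
  induction a, b using pvEuclid.induct with
  | case1 a => simp [pvEuclid]
  | case2 a b ih =>
      rw [pvEuclid, ih, Nat.gcd_comm (b + 1), Nat.gcd_comm a (b + 1), Nat.gcd_rec (b + 1) a]

-- B's value is the (positive) lcm of the magnitudes.
theorem alt_eq_lcm (n1 n2 : Int) :
    least_common_multiple_naive_alt n1 n2 = (Nat.lcm n1.natAbs n2.natAbs : Int) := by
  unfold least_common_multiple_naive_alt
  rw [pvEuclid_eq_gcd, Int.natAbs_mul, PySem.Int.floordiv_natCast]
  rfl

-- A's scan, unrolled: if the k-th candidate is the first common multiple, the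
-- loop returns it (provided the fuel covers k steps).
theorem pvLoopA_eq (n1 n2 : Int) (k : Nat) :
    ∀ (fuel : Nat) (great : Int), k < fuel →
    (PySem.Int.mod (great + k) n1 = 0 ∧ PySem.Int.mod (great + k) n2 = 0) →
    (∀ j : Nat, j < k → ¬(PySem.Int.mod (great + j) n1 = 0 ∧ PySem.Int.mod (great + j) n2 = 0)) →
    pvLoopA n1 n2 fuel great = great + k := by
  induction k with
  | zero =>
      intro fuel great hf hP _
      obtain ⟨f, rfl⟩ : ∃ f, fuel = f + 1 := ⟨fuel - 1, by omega⟩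
      simp only [Nat.cast_zero, add_zero] at hP ⊢
      rw [pvLoopA, if_pos hP]
  | succ k ih =>
      intro fuel great hf hP hmin
      obtain ⟨f, rfl⟩ : ∃ f, fuel = f + 1 := ⟨fuel - 1, by omega⟩
      rw [pvLoopA, if_neg (by simpa using hmin 0 (by omega))]
      have := ih f (great + 1) (by omega)
        (by push_cast at hP ⊢; convert hP using 3 <;> ring)
        (by intro j hj
            have := hmin (j + 1) (by omega)
            push_cast at this ⊢
            convert this using 4 <;> ring)
      rw [this]; push_cast; ring

theorem lcm_facts (n1 n2 : Int) (h1 : n1 ≠ 0) (h2 : n2 ≠ 0) :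
    0 < (Nat.lcm n1.natAbs n2.natAbs : Int) ∧
    n1 ∣ (Nat.lcm n1.natAbs n2.natAbs : Int) ∧ n2 ∣ (Nat.lcm n1.natAbs n2.natAbs : Int) := by
  refine ⟨?_, ?_, ?_⟩
  · exact_mod_cast Nat.lcm_pos (Int.natAbs_pos.mpr h1) (Int.natAbs_pos.mpr h2)
  · exact (Int.natAbs_dvd).mp (Int.natCast_dvd_natCast.mpr (Nat.dvd_lcm_left _ _))
  · exact (Int.natAbs_dvd).mp (Int.natCast_dvd_natCast.mpr (Nat.dvd_lcm_right _ _))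

theorem least_common_multiple_naive_unchanged_aux (n1 n2 : Int)
    (h1 : n1 ≠ 0) (h2 : n2 ≠ 0) (hD : ¬(n1 < 0 ∧ n2 < 0)) :
    least_common_multiple_naive n1 n2 = least_common_multiple_naive_alt n1 n2 := by
  set m : Int := if n1 > n2 then n1 else n2 with hm
  set L : Int := (Nat.lcm n1.natAbs n2.natAbs : Int) with hL
  obtain ⟨hLpos, hd1, hd2⟩ := lcm_facts n1 n2 h1 h2
  have hmpos : 0 < m := by
    rcases not_and_or.mp hD with h | h <;> rw [hm] <;> split_ifs with hgt <;> omega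
  have hmL : m ≤ L := by
    have e1n : n1.natAbs ≤ Nat.lcm n1.natAbs n2.natAbs :=
      Nat.le_of_dvd (by exact_mod_cast hLpos) (Nat.dvd_lcm_left _ _)
    have e2n : n2.natAbs ≤ Nat.lcm n1.natAbs n2.natAbs :=
      Nat.le_of_dvd (by exact_mod_cast hLpos) (Nat.dvd_lcm_right _ _)
    have e1 : (n1.natAbs : Int) ≤ L := by rw [hL]; exact_mod_cast e1n
    have e2 : (n2.natAbs : Int) ≤ L := by rw [hL]; exact_mod_cast e2n
    rw [hm]; split_ifs <;> omega
  set k : Nat := (L - m).toNat with hk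
  have hkcast : (k : Int) = L - m := by rw [hk]; omega
  have hLdvd : ∀ t : Int, n1 ∣ t → n2 ∣ t → L ∣ t := by
    intro t u1 u2
    exact Int.dvd_natAbs.mp (Int.natCast_dvd_natCast.mpr
      (Nat.lcm_dvd (Int.natAbs_dvd_natAbs.mpr u1) (Int.natAbs_dvd_natAbs.mpr u2)))
  have hklt : k < n1.natAbs * n2.natAbs + 1 := by
    have h4 : Nat.lcm n1.natAbs n2.natAbs ≤ n1.natAbs * n2.natAbs :=
      Nat.le_of_dvd (Nat.mul_pos (Int.natAbs_pos.mpr h1) (Int.natAbs_pos.mpr h2))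
        (Nat.lcm_dvd_mul _ _)
    have h5 : L ≤ ((n1.natAbs * n2.natAbs : Nat) : Int) := by rw [hL]; exact_mod_cast h4
    omega
  have hloop : pvLoopA n1 n2 (n1.natAbs * n2.natAbs + 1) m = m + k := by
    apply pvLoopA_eq n1 n2 k _ m hklt
    · have ht : m + (k : Int) = L := by omega
      rw [ht]
      exact ⟨(PySem.Int.mod_eq_zero_iff_dvd _ _).mpr hd1,
             (PySem.Int.mod_eq_zero_iff_dvd _ _).mpr hd2⟩
    · intro j hj hPj
      have u1 : n1 ∣ m + j := (PySem.Int.mod_eq_zero_iff_dvd _ _).mp hPj.1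
      have u2 : n2 ∣ m + j := (PySem.Int.mod_eq_zero_iff_dvd _ _).mp hPj.2
      obtain ⟨d, hd⟩ := hLdvd _ u1 u2
      have hjnn : (0 : Int) ≤ (j : Int) := Int.natCast_nonneg j
      have hjc : (j : Int) < (k : Int) := by exact_mod_cast hj
      have hdpos : 0 < d := by nlinarith
      have h9 : L ≤ m + j := by rw [hd]; exact le_mul_of_one_le_right hLpos.le hdpos
      omega
  rw [alt_eq_lcm]
  show pvLoopA n1 n2 (n1.natAbs * n2.natAbs + 1) m = L
  rw [hloop]; omega

-- Inside D_ (both arguments negative) A's result is ≤ 0 while B's is positive.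
theorem least_common_multiple_naive_exact_aux (n1 n2 : Int)
    (h1 : n1 ≠ 0) (h2 : n2 ≠ 0) (hn1 : n1 < 0) (hn2 : n2 < 0) :
    least_common_multiple_naive n1 n2 ≠ least_common_multiple_naive_alt n1 n2 := by
  set m : Int := if n1 > n2 then n1 else n2 with hm
  have hmneg : m < 0 := by rw [hm]; split_ifs <;> omega
  -- the predicate A's loop tests, and a hit at index j0 (the candidate 0)
  set P : Nat → Prop :=
    fun j => PySem.Int.mod (m + j) n1 = 0 ∧ PySem.Int.mod (m + j) n2 = 0 with hP
  have hPdec : DecidablePred P := by rw [hP]; infer_instance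
  set j0 : Nat := (-m).toNat with hj0
  have hj0cast : (j0 : Int) = -m := by rw [hj0]; omega
  have hPj0 : P j0 := by
    rw [hP]
    show PySem.Int.mod (m + (j0 : Int)) n1 = 0 ∧ PySem.Int.mod (m + (j0 : Int)) n2 = 0
    have hz : m + (j0 : Int) = 0 := by omega
    rw [hz]
    exact ⟨(PySem.Int.mod_eq_zero_iff_dvd _ _).mpr (dvd_zero _),
           (PySem.Int.mod_eq_zero_iff_dvd _ _).mpr (dvd_zero _)⟩
  have hex : ∃ j, P j := ⟨j0, hPj0⟩
  set k : Nat := Nat.find hex with hkdef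
  have hkle : k ≤ j0 := Nat.find_le hPj0
  have hj0le : j0 ≤ n1.natAbs := by omega
  have hklt : k < n1.natAbs * n2.natAbs + 1 := by
    have : 1 ≤ n2.natAbs := Int.natAbs_pos.mpr h2
    have : n1.natAbs * 1 ≤ n1.natAbs * n2.natAbs := Nat.mul_le_mul_left _ this
    omega
  have hloop : pvLoopA n1 n2 (n1.natAbs * n2.natAbs + 1) m = m + k := by
    apply pvLoopA_eq n1 n2 k _ m hklt (Nat.find_spec hex)
    intro j hj
    exact Nat.find_min hex hj
  have hA : least_common_multiple_naive n1 n2 = m + k := hloop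
  have hAle : least_common_multiple_naive n1 n2 ≤ 0 := by rw [hA]; omega
  have hBpos : 0 < least_common_multiple_naive_alt n1 n2 := by
    rw [alt_eq_lcm]; exact (lcm_facts n1 n2 h1 h2).1
  omega

-- ===== VERDICT (by name: the statement is the Claim_ definition above) =====
theorem least_common_multiple_naive_spec : Claim_unchanged_least_common_multiple_naive := by
  intro n1 n2 _ hpre hnD
  exact least_common_multiple_naive_unchanged_aux n1 n2 hpre.1 hpre.2 hnD

theorem least_common_multiple_naive_changed : Claim_changed_least_common_multiple_naive := by
  unfold Claim_changed_least_common_multiple_naive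
  refine ⟨by decide, by decide, by decide, by decide, ?_, by decide⟩
  show least_common_multiple_naive_alt (-2) (-3) = 6
  rw [alt_eq_lcm]; decide

theorem least_common_multiple_naive_tight : Claim_exact_least_common_multiple_naive := by
  intro n1 n2 _ hpre hD
  exact least_common_multiple_naive_exact_aux n1 n2 hpre.1 hpre.2 hD.1 hD.2
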